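-- pv_equiv track=rewrite | github.com/amboar/linux | ast2400mf.py | get_mask_bits
-- ===== SOURCE A (Python) =====
-- def get_mask_bits(mask):
--     if "," in mask:
--         bits = set()
--         for disjoint in mask.split(","):
--             bits.update(get_mask_bits(disjoint))
--         return bits
--     if ":" in mask:
--         r = [ int(x) for x in mask.split(":") ]
--         s = set(range(r[1], r[0] + 1))
--         return s
--     return set( [ int(mask) ] )
-- ===== SOURCE B (Python) =====
-- def get_mask_bits(mask):
--     bits = set()
--     for seg in mask.split(","):
--         if ":" in seg:
--             r = [int(x) for x in seg.split(":")]
--             bits.update(range(r[1], r[0] + 1))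
--         else:
--             bits.add(int(seg))
--     return bits
-- ===== Notes on version B (the rewrite author's own statement) =====
-- stated objective: simpler
-- what changed: Replaces A's self-recursion (recurse on each comma-split piece, three early-return branches) with a single flat loop over the comma-split pieces that classifies each segment in place, with no recursion.
import Mathlib
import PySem

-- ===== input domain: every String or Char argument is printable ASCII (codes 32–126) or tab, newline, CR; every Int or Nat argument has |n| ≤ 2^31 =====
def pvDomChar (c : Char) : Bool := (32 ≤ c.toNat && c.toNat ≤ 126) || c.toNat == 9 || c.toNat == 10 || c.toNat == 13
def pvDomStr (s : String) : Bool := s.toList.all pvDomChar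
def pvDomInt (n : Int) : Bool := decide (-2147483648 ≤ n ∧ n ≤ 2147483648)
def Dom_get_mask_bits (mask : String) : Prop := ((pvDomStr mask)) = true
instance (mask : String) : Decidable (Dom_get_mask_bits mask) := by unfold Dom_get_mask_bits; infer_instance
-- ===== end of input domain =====

-- B replaces A's recursion over comma-split pieces by one flat loop over the pieces (simpler decomposition, same cost).

-- termination helpers for port A (cited by decreasing_by)

theorem pvGo_nil (c : Char) (n : Nat) (cur : List Char) (acc : List (List Char)) :
    PySem.Chars.splitOn.go [c] (n + 1) [] cur acc = (cur.reverse :: acc).reverse := by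
  simp [PySem.Chars.splitOn.go]

theorem pvGo_cons (c : Char) (n : Nat) (d : Char) (rest cur : List Char) (acc : List (List Char)) :
    PySem.Chars.splitOn.go [c] (n + 1) (d :: rest) cur acc =
      if c = d then PySem.Chars.splitOn.go [c] n rest [] (cur.reverse :: acc)
      else PySem.Chars.splitOn.go [c] n rest (d :: cur) acc := by
  by_cases h : c = d <;>
    simp [PySem.Chars.splitOn.go, List.isPrefixOf, h]

-- every piece of the splitter is an old piece or is bounded by the unread input
theorem pvGo_len (c : Char) : ∀ (fuel : Nat) (l cur : List Char) (acc : List (List Char)),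
    l.length < fuel → ∀ p ∈ PySem.Chars.splitOn.go [c] fuel l cur acc,
      p ∈ acc ∨ p.length ≤ cur.length + l.length := by
  intro fuel
  induction fuel with
  | zero => intro l cur acc h; exact absurd h (by omega)
  | succ n ih =>
    intro l cur acc h p hp
    match l with
    | [] =>
      rw [pvGo_nil] at hp
      simp at hp
      rcases hp with hp | hp
      · left; exact hp
      · right; simp [hp]
    | d :: rest =>
      rw [pvGo_cons] at hp
      by_cases hd : c = d
      · rw [if_pos hd] at hp
        rcases ih _ _ _ (by simp at h; omega) p hp with h' | h'
        · rcases List.mem_cons.mp h' with h2 | h2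
          · right; rw [h2]; simp only [List.length_reverse, List.length_cons]; omega
          · left; exact h2
        · right; simp at h' ⊢; omega
      · rw [if_neg hd] at hp
        rcases ih _ _ _ (by simp at h; omega) p hp with h' | h'
        · left; exact h'
        · right; simp at h' ⊢; omega

-- with an occurrence of the separator still unread, the bound is strict
theorem pvGo_len_lt (c : Char) : ∀ (fuel : Nat) (l cur : List Char) (acc : List (List Char)),
    l.length < fuel → c ∈ l → ∀ p ∈ PySem.Chars.splitOn.go [c] fuel l cur acc,
      p ∈ acc ∨ p.length < cur.length + l.length := by
  intro fuel
  induction fuel with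
  | zero => intro l cur acc h; exact absurd h (by omega)
  | succ n ih =>
    intro l cur acc h hc p hp
    match l with
    | [] => simp at hc
    | d :: rest =>
      rw [pvGo_cons] at hp
      by_cases hd : c = d
      · rw [if_pos hd] at hp
        rcases pvGo_len c _ _ _ _ (by simp at h; omega) p hp with h' | h'
        · rcases List.mem_cons.mp h' with h2 | h2
          · right; rw [h2]; simp only [List.length_reverse, List.length_cons]; omega
          · left; exact h2
        · right; simp at h' ⊢; omega
      · rw [if_neg hd] at hp
        have hc' : c ∈ rest := by
          rcases List.mem_cons.mp hc with h2 | h2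
          · exact absurd h2 hd
          · exact h2
        rcases ih _ _ _ (by simp at h; omega) hc' p hp with h' | h'
        · left; exact h'
        · right; simp at h' ⊢; omega

-- each piece of s.split(c) is strictly shorter than s when c occurs in s
theorem pvSplitOn_len_lt (c : Char) (s : List Char) (hc : c ∈ s) :
    ∀ p ∈ PySem.Chars.splitOn s [c], p.length < s.length := by
  intro p hp
  have := pvGo_len_lt c (s.length + 1) s [] [] (by omega) hc p hp
  simpa using this

-- a comma-split piece is shorter than the whole string (termination of port A)
theorem pvPiece_lt (mask seg : String) (h : PySem.Str.isIn "," mask = true)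
    (hseg : seg ∈ (PySem.Str.split? mask ",").getD []) :
    seg.toList.length < mask.toList.length := by
  have hmem : ',' ∈ mask.toList := by
    have h2 := (PySem.Str.isIn_iff_infix "," mask).mp h
    exact (List.singleton_infix_iff ',' mask.toList).mp (by simpa using h2)
  have hsp : (PySem.Str.split? mask ",").getD [] =
      (PySem.Chars.splitOn mask.toList [',']).map String.ofList := by
    simp [PySem.Str.split?, PySem.Chars.split?]
  rw [hsp] at hseg
  obtain ⟨p, hp, rfl⟩ := List.mem_map.mp hseg
  have := pvSplitOn_len_lt ',' mask.toList hmem p hp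
  simpa using this

-- ===== PORT A =====
def get_mask_bits (mask : String) : List Int :=
  if h : PySem.Str.isIn "," mask = true then
    (((PySem.Str.split? mask ",").getD []).attach.foldl
      (fun bits d => PySem.Set.update bits (get_mask_bits d.1)) PySem.Set.empty)
  else if PySem.Str.isIn ":" mask = true then
    let r := ((PySem.Str.split? mask ":").getD []).map (fun x => (PySem.Int.ofStr? x).getD 0)
    PySem.Set.ofList (PySem.List.pyRange (PySem.List.pyGetD r 1 0) (PySem.List.pyGetD r 0 0 + 1) 1)
  else
    PySem.Set.ofList [(PySem.Int.ofStr? mask).getD 0]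
termination_by mask.toList.length
decreasing_by
  exact pvPiece_lt mask d.1 h d.2

-- ===== PORT B =====
def get_mask_bits_alt (mask : String) : List Int :=
  ((PySem.Str.split? mask ",").getD []).foldl
    (fun bits seg =>
      if PySem.Str.isIn ":" seg = true then
        let r := ((PySem.Str.split? seg ":").getD []).map (fun x => (PySem.Int.ofStr? x).getD 0)
        PySem.Set.update bits (PySem.List.pyRange (PySem.List.pyGetD r 1 0) (PySem.List.pyGetD r 0 0 + 1) 1)
      else
        PySem.Set.add bits ((PySem.Int.ofStr? seg).getD 0))
    PySem.Set.empty

-- ===== PRECONDITION & SPEC =====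
-- Pre_ excludes exactly the inputs on which Python's int() raises ValueError (an unparsable piece).
def Pre_get_mask_bits (mask : String) : Prop :=
  ∀ seg ∈ (PySem.Str.split? mask ",").getD [],
    if PySem.Str.isIn ":" seg = true then
      ∀ x ∈ (PySem.Str.split? seg ":").getD [], (PySem.Int.ofStr? x).isSome = true
    else (PySem.Int.ofStr? seg).isSome = true
instance (mask : String) : Decidable (Pre_get_mask_bits mask) := by unfold Pre_get_mask_bits; infer_instance
def pvWitness_get_mask_bits : String := "4:2,7"

def Spec_get_mask_bits (mask : String) (out : List Int) : Prop := out = get_mask_bits_alt mask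
instance (mask : String) (out : List Int) : Decidable (Spec_get_mask_bits mask out) := by unfold Spec_get_mask_bits; infer_instance

-- ===== CLAIM (what is proved, stated in full; the proofs are below) =====
def Claim_equal_get_mask_bits : Prop := ∀ (mask : String), Dom_get_mask_bits mask → Pre_get_mask_bits mask → Spec_get_mask_bits mask (get_mask_bits mask)

-- ===== LEMMAS AND PROOFS =====

-- with no separator left, the splitter returns the single remaining piece
theorem pvGo_all (c : Char) : ∀ (fuel : Nat) (l cur : List Char) (acc : List (List Char)),
    l.length < fuel → c ∉ l →
      PySem.Chars.splitOn.go [c] fuel l cur acc = ((cur.reverse ++ l) :: acc).reverse := by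
  intro fuel
  induction fuel with
  | zero => intro l cur acc h; exact absurd h (by omega)
  | succ n ih =>
    intro l cur acc h hc
    match l with
    | [] => rw [pvGo_nil]; simp
    | d :: rest =>
      rw [pvGo_cons]
      have hd : ¬ c = d := fun e => hc (by simp [e])
      rw [if_neg hd, ih _ _ _ (by simp at h; omega) (fun e => hc (by simp [e]))]
      simp

-- pieces produced by the splitter do not contain the separator
theorem pvGo_nosep (c : Char) : ∀ (fuel : Nat) (l cur : List Char) (acc : List (List Char)),
    l.length < fuel → c ∉ cur → ∀ p ∈ PySem.Chars.splitOn.go [c] fuel l cur acc,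
      p ∈ acc ∨ c ∉ p := by
  intro fuel
  induction fuel with
  | zero => intro l cur acc h; exact absurd h (by omega)
  | succ n ih =>
    intro l cur acc h hcur p hp
    match l with
    | [] =>
      rw [pvGo_nil] at hp
      simp at hp
      rcases hp with hp | hp
      · left; exact hp
      · right; rw [hp]; simpa using hcur
    | d :: rest =>
      rw [pvGo_cons] at hp
      by_cases hd : c = d
      · rw [if_pos hd] at hp
        rcases ih _ _ _ (by simp at h; omega) (by simp) p hp with h' | h'
        · rcases List.mem_cons.mp h' with h2 | h2
          · right; rw [h2]; simpa using hcur
          · left; exact h2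
        · right; exact h'
      · rw [if_neg hd] at hp
        rcases ih _ _ _ (by simp at h; omega) (by simpa using ⟨hd, hcur⟩) p hp with h' | h'
        · left; exact h'
        · right; exact h'

-- s.split(",") when s has no comma is [s]
theorem pvSplit_noComma (s : String) (h : PySem.Str.isIn "," s = false) :
    (PySem.Str.split? s ",").getD [] = [s] := by
  have hmem : ',' ∉ s.toList := by
    intro hm
    have := (PySem.Str.isIn_iff_infix "," s).mpr (by simpa using (List.singleton_infix_iff ',' s.toList).mpr hm)
    rw [h] at this
    exact Bool.false_ne_true this
  have hsp : (PySem.Str.split? s ",").getD [] =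
      (PySem.Chars.splitOn s.toList [',']).map String.ofList := by
    simp [PySem.Str.split?, PySem.Chars.split?]
  rw [hsp]
  unfold PySem.Chars.splitOn
  rw [pvGo_all ',' _ _ _ _ (by omega) hmem]
  simp

-- each piece of mask.split(",") contains no comma
theorem pvPiece_noComma (mask seg : String)
    (hseg : seg ∈ (PySem.Str.split? mask ",").getD []) :
    PySem.Str.isIn "," seg = false := by
  have hsp : (PySem.Str.split? mask ",").getD [] =
      (PySem.Chars.splitOn mask.toList [',']).map String.ofList := by
    simp [PySem.Str.split?, PySem.Chars.split?]
  rw [hsp] at hseg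
  obtain ⟨p, hp, rfl⟩ := List.mem_map.mp hseg
  have hmem : ',' ∉ p := by
    have := pvGo_nosep ',' (mask.toList.length + 1) mask.toList [] [] (by omega) (by simp) p
      (by simpa [PySem.Chars.splitOn] using hp)
    simpa using this
  rw [← Bool.not_eq_true]
  intro hIn
  exact hmem ((List.singleton_infix_iff ',' _).mp
    (by simpa using (PySem.Str.isIn_iff_infix "," (String.ofList p)).mp hIn))

-- updating with set(xs) is updating with xs (adding deduplicates anyway)
theorem pvUpdate_ofList (s : PySem.Set Int) (xs : List Int) :
    PySem.Set.update s (PySem.Set.ofList xs) = PySem.Set.update s xs := by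
  rw [PySem.Set.update_eq_append_filter, PySem.Set.update_eq_append_filter,
    PySem.Set.ofList_ofList]

-- one step of B's loop agrees with A's recursive call on a comma-free piece
theorem pvStep (seg : String) (h : PySem.Str.isIn "," seg = false) (bits : PySem.Set Int) :
    PySem.Set.update bits (get_mask_bits seg) =
      (if PySem.Str.isIn ":" seg = true then
        PySem.Set.update bits
          (PySem.List.pyRange
            (PySem.List.pyGetD (((PySem.Str.split? seg ":").getD []).map
              (fun x => (PySem.Int.ofStr? x).getD 0)) 1 0)
            (PySem.List.pyGetD (((PySem.Str.split? seg ":").getD []).map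
              (fun x => (PySem.Int.ofStr? x).getD 0)) 0 0 + 1) 1)
      else PySem.Set.add bits ((PySem.Int.ofStr? seg).getD 0)) := by
  have h' : PySem.Chars.isIn [','] seg.toList = false := by simpa using h
  rw [get_mask_bits]
  rw [dif_neg (by simp [h'])]
  by_cases hc : PySem.Str.isIn ":" seg = true
  · rw [if_pos hc, if_pos hc, pvUpdate_ofList]
  · rw [if_neg hc, if_neg hc]
    rfl

theorem pv_main (mask : String) : get_mask_bits mask = get_mask_bits_alt mask := by
  by_cases h : PySem.Str.isIn "," mask = true
  · rw [get_mask_bits, dif_pos h]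
    unfold get_mask_bits_alt
    rw [List.foldl_attach (f := fun bits seg => PySem.Set.update bits (get_mask_bits seg))]
    exact PySem.List.foldl_congr_mem _ _ _ _
      (fun bits seg hseg => pvStep seg (pvPiece_noComma mask seg hseg) bits)
  · have hB : get_mask_bits_alt mask =
        PySem.Set.update PySem.Set.empty (get_mask_bits mask) := by
      unfold get_mask_bits_alt
      rw [pvSplit_noComma mask (by simpa using h)]
      rw [List.foldl_cons, List.foldl_nil]
      exact (pvStep mask (by simpa using h) PySem.Set.empty).symm
    rw [hB, get_mask_bits, dif_neg h]
    by_cases hc : PySem.Str.isIn ":" mask = true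
    · rw [if_pos hc]
      show PySem.Set.ofList _ = PySem.Set.update PySem.Set.empty (PySem.Set.ofList _)
      rw [pvUpdate_ofList]
      rfl
    · rw [if_neg hc]
      rfl

-- ===== VERDICT (by name: the statement is the Claim_ definition above) =====
theorem get_mask_bits_spec : Claim_equal_get_mask_bits := by
  intro mask _ _
  exact pv_main mask
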